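-- pv_equiv track=rewrite | github.com/asnar00/zeta | zeta.py | _add_ts_exports
-- ===== SOURCE A (Python) =====
-- def _add_ts_exports(code):
--     """Add 'export' keyword to all top-level function declarations."""
--     lines = code.split('\n')
--     for i, line in enumerate(lines):
--         stripped = line.lstrip()
--         if stripped.startswith(('function ', 'function* ', 'async function ', 'async function* ')):
--             indent = line[:len(line) - len(stripped)]
--             lines[i] = indent + 'export ' + stripped
--     return '\n'.join(lines)
-- ===== SOURCE B (Python) =====
-- def _add_ts_exports(code):
--     """Add 'export' keyword to all top-level function declarations."""
--     out = []
--     i, n = 0, len(code)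
--     while True:
--         j = i
--         while j < n and code[j] in ' \t\r':
--             j += 1
--         out.append(code[i:j])
--         if code.startswith(('function ', 'function* ', 'async function ', 'async function* '), j):
--             out.append('export ')
--         k = code.find('\n', j)
--         if k == -1:
--             out.append(code[j:])
--             break
--         out.append(code[j:k + 1])
--         i = k + 1
--     return ''.join(out)
-- ===== Notes on version B (the rewrite author's own statement) =====
-- stated objective: alternative
-- what changed: A splits the code into a list of lines, mutates matching entries in place and joins them back; B makes a single left-to-right scan over the string with position indices, copying each line once and inserting the export keyword right after the leading whitespace when one of the four function-declaration prefixes follows.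
import Mathlib
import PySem

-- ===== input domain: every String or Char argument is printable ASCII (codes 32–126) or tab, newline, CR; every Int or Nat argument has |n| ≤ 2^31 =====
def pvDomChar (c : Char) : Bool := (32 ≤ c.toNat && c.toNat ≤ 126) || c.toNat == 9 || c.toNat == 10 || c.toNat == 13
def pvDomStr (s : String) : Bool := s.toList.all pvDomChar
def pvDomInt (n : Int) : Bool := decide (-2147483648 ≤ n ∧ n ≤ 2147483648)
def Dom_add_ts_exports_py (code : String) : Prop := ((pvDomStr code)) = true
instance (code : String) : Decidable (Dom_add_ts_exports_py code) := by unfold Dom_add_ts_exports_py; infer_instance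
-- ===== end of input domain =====

-- B replaces A's split-into-lines / per-line lstrip-and-rebuild / join pipeline by a single
-- left-to-right scan of the string that copies each line once, inserting 'export ' after the
-- leading whitespace when one of the four function prefixes follows (objective: alternative).

-- shared helpers: the intra-line whitespace test (exact for Python's lstrip on the ASCII
-- domain Dom, which contains no '\x0b'/'\x0c'; '\n' never occurs inside a split line)
-- and the four-prefix test
def wsP (c : Char) : Bool := c == ' ' || c == '\t' || c == '\r'

def prefOK (s : List Char) : Bool :=
  "function ".toList.isPrefixOf s || "function* ".toList.isPrefixOf s ||
  "async function ".toList.isPrefixOf s || "async function* ".toList.isPrefixOf s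

-- ===== PORT A =====
-- for-loop body: lines[i] := indent + 'export ' + stripped when a prefix matches; each line
-- is rewritten independently of the others, so the loop is a map over code.split('\n')
def fixLine (line : List Char) : List Char :=
  let stripped := line.dropWhile wsP
  if prefOK stripped then
    (line.take (line.length - stripped.length)) ++ "export ".toList ++ stripped
  else line

def add_ts_exports_py (code : String) : String :=
  String.mk (List.intercalate ['\n'] ((code.toList.splitOn '\n').map fixLine))

-- ===== PORT B =====
-- Source B's while-loop over positions i/j/k, as recursion on the characters still to scan:
-- ws = code[i:j], body = code[j:k] (rest of the line), then continue after the '\n'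
def goB (cs : List Char) : List Char :=
  let ws := cs.takeWhile wsP
  let rest := cs.dropWhile wsP
  let expo := if prefOK rest then "export ".toList else ([] : List Char)
  let body := rest.takeWhile (fun c => !(c == '\n'))
  match h : rest.dropWhile (fun c => !(c == '\n')) with
  | [] => ws ++ expo ++ body
  | _ :: t => ws ++ expo ++ body ++ '\n' :: goB t
termination_by cs.length
decreasing_by
  have h1 := List.length_dropWhile_le (fun c => !(c == '\n')) (cs.dropWhile wsP)
  have h2 := List.length_dropWhile_le wsP cs
  rw [h] at h1
  simp at h1
  omega

def add_ts_exports_py_alt (code : String) : String := String.mk (goB code.toList)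

-- ===== PRECONDITION & SPEC =====
def Spec_add_ts_exports_py (code : String) (out : String) : Prop := out = add_ts_exports_py_alt code
instance (code : String) (out : String) : Decidable (Spec_add_ts_exports_py code out) := by unfold Spec_add_ts_exports_py; infer_instance

-- ===== CLAIM (what is proved, stated in full; the proofs are below) =====
def Claim_equal_add_ts_exports_py : Prop := ∀ (code : String), Dom_add_ts_exports_py code → Spec_add_ts_exports_py code (add_ts_exports_py code)

-- ===== LEMMAS AND PROOFS =====

lemma take_sub (p : Char → Bool) (l : List Char) :
    List.take (l.length - (l.dropWhile p).length) l = l.takeWhile p := by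
  induction l with
  | nil => rfl
  | cons c cs ih =>
    by_cases hc : p c = true
    · have hd := List.length_dropWhile_le p cs
      simp [List.takeWhile_cons, hc,
        show cs.length + 1 - (cs.dropWhile p).length = (cs.length - (cs.dropWhile p).length) + 1 by
          omega,
        List.take_succ_cons, ih]
    · simp [List.dropWhile_cons, hc]

lemma splitOn_no_nl (L : List Char) (h : '\n' ∉ L) : L.splitOn '\n' = [L] := by
  induction L with
  | nil => rfl
  | cons c cs ih =>
    simp at h
    simp only [List.splitOn, List.splitOnP_cons] at *
    rw [if_neg (by simp; exact fun hc => h.1 hc.symm)]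
    rw [ih h.2]
    rfl

lemma splitOn_append (L t : List Char) (h : '\n' ∉ L) :
    (L ++ '\n' :: t).splitOn '\n' = L :: t.splitOn '\n' := by
  induction L with
  | nil => simp [List.splitOn, List.splitOnP_cons]
  | cons c cs ih =>
    simp at h
    simp only [List.cons_append, List.splitOn, List.splitOnP_cons] at *
    rw [if_neg (by simp; exact fun hc => h.1 hc.symm)]
    rw [ih h.2]
    rfl

lemma splitOn_ne_nil (l : List Char) : l.splitOn '\n' ≠ [] := by
  induction l with
  | nil => simp [List.splitOn, List.splitOnP_nil]
  | cons c cs ih =>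
    simp only [List.splitOn, List.splitOnP_cons] at *
    split
    · simp
    · cases hx : List.splitOnP (fun c => c == '\n') cs with
      | nil => exact absurd hx ih
      | cons y ys => simp [List.modifyHead]

lemma prefix_skip_nl (p a t : List Char) (hp : '\n' ∉ p) (ha : '\n' ∉ a) :
    p.isPrefixOf (a ++ '\n' :: t) = p.isPrefixOf a := by
  induction p generalizing a with
  | nil => simp [List.isPrefixOf]
  | cons c cs ih =>
    simp at hp
    cases a with
    | nil =>
      simp [List.isPrefixOf]
      intro hc; exact absurd hc.symm hp.1
    | cons b bs =>
      simp at ha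
      simp only [List.cons_append, List.isPrefixOf]
      rw [ih bs hp.2 ha.2]

lemma prefOK_skip (a t : List Char) (ha : '\n' ∉ a) :
    prefOK (a ++ '\n' :: t) = prefOK a := by
  unfold prefOK
  rw [prefix_skip_nl _ a t (by decide) ha, prefix_skip_nl _ a t (by decide) ha,
    prefix_skip_nl _ a t (by decide) ha, prefix_skip_nl _ a t (by decide) ha]

lemma takeWhile_ws_append (L t : List Char) :
    List.takeWhile wsP (L ++ '\n' :: t) = List.takeWhile wsP L := by
  rw [List.takeWhile_append]
  split
  · next hlen =>
    have hL : List.takeWhile wsP L = L :=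
      List.IsPrefix.eq_of_length (List.takeWhile_prefix _) hlen
    simp [show wsP '\n' = false from rfl, hL]
  · rfl

lemma dropWhile_ws_append (L t : List Char) :
    List.dropWhile wsP (L ++ '\n' :: t) = List.dropWhile wsP L ++ '\n' :: t := by
  rw [List.dropWhile_append]
  split
  · next he =>
    simp only [List.isEmpty_iff] at he
    simp [show wsP '\n' = false from rfl, he]
  · rfl

lemma takeWhile_nnl_append (a t : List Char) (ha : '\n' ∉ a) :
    List.takeWhile (fun c => !(c == '\n')) (a ++ '\n' :: t) = a := by
  rw [List.takeWhile_append]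
  have h1 : List.takeWhile (fun c => !(c == '\n')) a = a :=
    List.takeWhile_eq_self_iff.mpr (by intro c hc; simp; exact fun h => ha (h ▸ hc))
  rw [if_pos (by rw [h1])]
  simp [h1]

lemma dropWhile_nnl_append (a t : List Char) (ha : '\n' ∉ a) :
    List.dropWhile (fun c => !(c == '\n')) (a ++ '\n' :: t) = '\n' :: t := by
  rw [List.dropWhile_append]
  have h1 : List.dropWhile (fun c => !(c == '\n')) a = [] := by
    rw [List.dropWhile_eq_nil_iff]
    intro c hc; simp; exact fun h => ha (h ▸ hc)
  rw [if_pos (by simp [h1])]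
  simp

lemma dropWhile_head_false {p : Char → Bool} :
    ∀ {l : List Char} {c : Char} {t : List Char}, List.dropWhile p l = c :: t → p c = false := by
  intro l
  induction l with
  | nil => intro c t h; simp [List.dropWhile] at h
  | cons a l ih =>
    intro c t h
    rw [List.dropWhile_cons] at h
    split at h
    · exact ih h
    · next hpa => cases h; simpa using hpa

lemma intercalate_cons_ne (s x : List Char) (xs : List (List Char)) (h : xs ≠ []) :
    List.intercalate s (x :: xs) = x ++ s ++ List.intercalate s xs := by
  cases xs with
  | nil => exact absurd rfl h
  | cons y ys => simp [List.intercalate]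

lemma intercalate_single (s x : List Char) : List.intercalate s [x] = x := by
  simp [List.intercalate]

lemma nnl_mem {a : List Char} (h : ∀ c ∈ a, (!(c == '\n')) = true) : '\n' ∉ a := by
  intro hm
  have := h '\n' hm
  simp at this

lemma fixLine_eq (l : List Char) :
    fixLine l = l.takeWhile wsP ++
      ((if prefOK (l.dropWhile wsP) then "export ".toList else ([] : List Char)) ++
        l.dropWhile wsP) := by
  by_cases h : prefOK (l.dropWhile wsP) = true
  · simp [fixLine, h, take_sub]
  · simp [fixLine, h, List.takeWhile_append_dropWhile]

lemma goB_eq (cs : List Char) :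
    goB cs = List.intercalate ['\n'] ((cs.splitOn '\n').map fixLine) := by
  induction hn : cs.length using Nat.strong_induction_on generalizing cs with
  | _ n ih =>
  cases hnd : List.dropWhile (fun c => !(c == '\n')) cs with
  | nil =>
    -- no newline in cs: a single line
    have hall := List.dropWhile_eq_nil_iff.mp hnd
    have hnil : '\n' ∉ cs := nnl_mem hall
    have hnilr : '\n' ∉ cs.dropWhile wsP := by
      intro hm; exact hnil ((List.dropWhile_sublist wsP).mem hm)
    have hnd2 : List.dropWhile (fun c => !(c == '\n')) (cs.dropWhile wsP) = [] := by
      rw [List.dropWhile_eq_nil_iff]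
      intro c hc; simp; exact fun h => hnilr (h ▸ hc)
    have hbody : List.takeWhile (fun c => !(c == '\n')) (cs.dropWhile wsP) = cs.dropWhile wsP :=
      List.takeWhile_eq_self_iff.mpr (by intro c hc; simp; exact fun h => hnilr (h ▸ hc))
    rw [goB]
    rw [splitOn_no_nl cs hnil]
    simp only [List.map_cons, List.map_nil, intercalate_single, fixLine_eq]
    split
    · next heq => rw [hbody, List.append_assoc]
    · next heq => rw [hnd2] at heq; cases heq
  | cons c t =>
    have hc : c = '\n' := by
      have := dropWhile_head_false hnd
      simpa using this
    subst hc
    have hLsplit := List.takeWhile_append_dropWhile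
      (p := fun c => !(c == '\n')) (l := cs)
    set L := List.takeWhile (fun c => !(c == '\n')) cs with hL
    have hcs : cs = L ++ '\n' :: t := by
      conv_lhs => rw [← hLsplit]
      rw [hnd]
    have hnilL : '\n' ∉ L := by
      intro hm
      have h2 : '\n' ∈ List.takeWhile (fun c => !(c == '\n')) cs := hL ▸ hm
      have := List.mem_takeWhile_imp h2
      simp at this
    have hnilr : '\n' ∉ L.dropWhile wsP := by
      intro hm; exact hnilL ((List.dropWhile_sublist wsP).mem hm)
    have htlen : t.length < n := by
      rw [hcs] at hn; simp at hn; omega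
    have hmapne : List.map fixLine (t.splitOn '\n') ≠ [] := by
      intro hmap
      exact splitOn_ne_nil t (List.map_eq_nil_iff.mp hmap)
    rw [goB, hcs]
    rw [splitOn_append L t hnilL]
    rw [List.map_cons, intercalate_cons_ne _ _ _ hmapne]
    rw [takeWhile_ws_append, dropWhile_ws_append, prefOK_skip _ _ hnilr,
      takeWhile_nnl_append _ _ hnilr]
    split
    · next heq =>
      rw [dropWhile_nnl_append _ _ hnilr] at heq
      cases heq
    · next x t' heq =>
      rw [dropWhile_nnl_append _ _ hnilr] at heq
      cases heq
      rw [ih t.length htlen t rfl]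
      rw [fixLine_eq]
      simp

-- ===== VERDICT (by name: the statement is the Claim_ definition above) =====
theorem add_ts_exports_py_spec : Claim_equal_add_ts_exports_py := by
  intro code _
  unfold Spec_add_ts_exports_py add_ts_exports_py add_ts_exports_py_alt
  rw [goB_eq]
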